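-- pv_equiv track=rewrite | github.com/daninatalicio/estudo_python | dictionaries/ex_02.py | dias_da_semana_italiano
-- ===== SOURCE A (Python) =====
-- def dias_da_semana_italiano(dia):
--
--     dias_dict = {'Lunedi': ['Segunda','Segunda-Feira','Segunda Feira'],
--                 'Martedi': ['Terça','Terça-Feira','Terça Feira'],
--                 'Mercoledi': ['Quarta', 'Quarta-Feira', 'Quarta Feira'],
--                 'Giovedi': ['Quinta', 'Quinta-Feira', 'Quinta Feira'],
--                 'Vernedi': ['Sexta', 'Sexta-Feira', 'Sexta Feira'],
--                 'Sabato': ['Sábado'],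
--                 'Domenica': ['Domingo']
--     }
--
--
--
--     for chave in dias_dict.keys():
--         for dias in dias_dict[chave]:
--             if dia == dias:
--                 return chave
-- ===== SOURCE B (Python) =====
-- def dias_da_semana_italiano(dia):
--     # Parse the Portuguese name instead of scanning spelling lists:
--     # weekend days have one spelling; ordinal weekdays are an ordinal base
--     # optionally followed by the 6-char suffix '-Feira' or ' Feira'.
--     weekend = {'S\u00e1bado': 'Sabato', 'Domingo': 'Domenica'}
--     if dia in weekend:
--         return weekend[dia]
--     base = dia
--     if dia.endswith('-Feira') or dia.endswith(' Feira'):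
--         base = dia[:-6]
--     ordinals = {'Segunda': 'Lunedi', 'Ter\u00e7a': 'Martedi', 'Quarta': 'Mercoledi',
--                 'Quinta': 'Giovedi', 'Sexta': 'Vernedi'}
--     return ordinals.get(base)
-- ===== Notes on version B (the rewrite author's own statement) =====
-- stated objective: alternative
-- what changed: Instead of A's nested scan over a dict of 17 listed spellings, B parses the input: it handles the two weekend names directly, strips an optional six-character Feira suffix (hyphen- or space-separated), and looks up the ordinal base name in a 5-entry table.
import Mathlib
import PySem

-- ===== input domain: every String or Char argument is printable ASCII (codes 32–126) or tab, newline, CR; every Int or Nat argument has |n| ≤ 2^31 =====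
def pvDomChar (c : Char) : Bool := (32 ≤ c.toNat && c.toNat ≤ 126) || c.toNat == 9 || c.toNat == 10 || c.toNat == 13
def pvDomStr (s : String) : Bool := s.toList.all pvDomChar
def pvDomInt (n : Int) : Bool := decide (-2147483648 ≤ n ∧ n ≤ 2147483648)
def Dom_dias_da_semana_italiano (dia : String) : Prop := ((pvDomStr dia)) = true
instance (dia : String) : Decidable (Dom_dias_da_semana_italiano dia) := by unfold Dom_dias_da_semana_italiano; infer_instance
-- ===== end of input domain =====

-- B parses the Portuguese name (strip an optional 6-char '-Feira'/' Feira' suffix, then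
-- look up the 7 canonical day names) instead of A's nested scan over 17 listed spellings
-- (alternative decomposition: suffix parsing replaces the spelling table).

-- ===== PORT A =====
-- inner 'for dias in dias_dict[chave]: if dia == dias: return chave'
def pvAInner (dia chave : String) : List String → Option String
  | [] => none
  | d :: ds => if dia == d then some chave else pvAInner dia chave ds

-- outer 'for chave in dias_dict.keys():' over the dict's (key, value) items in order
def pvAOuter (dia : String) : List (String × List String) → Option String
  | [] => none
  | (chave, vs) :: rest =>
    match pvAInner dia chave vs with
    | some r => some r
    | none => pvAOuter dia rest

def dias_da_semana_italiano (dia : String) : Option String :=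
  pvAOuter dia
    [("Lunedi", ["Segunda", "Segunda-Feira", "Segunda Feira"]),
     ("Martedi", ["Terça", "Terça-Feira", "Terça Feira"]),
     ("Mercoledi", ["Quarta", "Quarta-Feira", "Quarta Feira"]),
     ("Giovedi", ["Quinta", "Quinta-Feira", "Quinta Feira"]),
     ("Vernedi", ["Sexta", "Sexta-Feira", "Sexta Feira"]),
     ("Sabato", ["Sábado"]),
     ("Domenica", ["Domingo"])]

-- ===== PORT B =====
def pvWeekend : PySem.Dict String String :=
  PySem.Dict.mk [("Sábado", "Sabato"), ("Domingo", "Domenica")]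

def pvOrdinals : PySem.Dict String String :=
  PySem.Dict.mk [("Segunda", "Lunedi"), ("Terça", "Martedi"), ("Quarta", "Mercoledi"),
                 ("Quinta", "Giovedi"), ("Sexta", "Vernedi")]

def dias_da_semana_italiano_alt (dia : String) : Option String :=
  -- 'if dia in weekend: return weekend[dia]'
  match pvWeekend.get? dia with
  | some v => some v
  | none =>
    -- 'base = dia[:-6] if dia.endswith(...) else dia'
    let base := if PySem.Str.endswith dia "-Feira" || PySem.Str.endswith dia " Feira"
                then PySem.Str.slice dia none (some (-6)) else dia
    pvOrdinals.get? base

-- ===== PRECONDITION & SPEC =====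
def Spec_dias_da_semana_italiano (dia : String) (out : Option String) : Prop := out = dias_da_semana_italiano_alt dia
instance (dia : String) (out : Option String) : Decidable (Spec_dias_da_semana_italiano dia out) := by unfold Spec_dias_da_semana_italiano; infer_instance

-- ===== CLAIM (what is proved, stated in full; the proofs are below) =====
def Claim_equal_dias_da_semana_italiano : Prop := ∀ (dia : String), Dom_dias_da_semana_italiano dia → Spec_dias_da_semana_italiano dia (dias_da_semana_italiano dia)

-- ===== LEMMAS AND PROOFS =====

-- if dia ends with the 6-char suffix suf but dia ≠ key ++ suf, then dia[:-6] ≠ key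
theorem pv_notbase (dia key suf full : String) (hlen : suf.toList.length = 6)
    (hfull : full.toList = key.toList ++ suf.toList)
    (hne : dia ≠ full)
    (e : PySem.Str.endswith dia suf = true) :
    PySem.Str.slice dia none (some (-6)) ≠ key := by
  intro hk
  rw [PySem.Str.endswith_eq] at e
  obtain ⟨p, hp⟩ := (PySem.Chars.endswith_iff _ _).mp e
  have hB : (PySem.Str.slice dia none (some (-6))).toList = p := by
    rw [PySem.Str.toList_slice, PySem.Chars.slice_eq_listSlice,
        PySem.List.slice_to_neg_ofNat _ 6 (by omega), ← hp]
    have hl : (p ++ suf.toList).length - 6 = p.length := by simp [hlen]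
    rw [hl, List.take_left]
  have hp2 : p = key.toList := by rw [← hB, hk]
  exact hne (String.toList_inj.mp (by rw [← hp, hp2, hfull]))

theorem pv_equal (dia : String) :
    dias_da_semana_italiano dia = dias_da_semana_italiano_alt dia := by
  by_cases h1 : dia = "Segunda"
  · subst h1; decide
  by_cases h2 : dia = "Segunda-Feira"
  · subst h2; decide
  by_cases h3 : dia = "Segunda Feira"
  · subst h3; decide
  by_cases h4 : dia = "Terça"
  · subst h4; decide
  by_cases h5 : dia = "Terça-Feira"
  · subst h5; decide
  by_cases h6 : dia = "Terça Feira"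
  · subst h6; decide
  by_cases h7 : dia = "Quarta"
  · subst h7; decide
  by_cases h8 : dia = "Quarta-Feira"
  · subst h8; decide
  by_cases h9 : dia = "Quarta Feira"
  · subst h9; decide
  by_cases h10 : dia = "Quinta"
  · subst h10; decide
  by_cases h11 : dia = "Quinta-Feira"
  · subst h11; decide
  by_cases h12 : dia = "Quinta Feira"
  · subst h12; decide
  by_cases h13 : dia = "Sexta"
  · subst h13; decide
  by_cases h14 : dia = "Sexta-Feira"
  · subst h14; decide
  by_cases h15 : dia = "Sexta Feira"
  · subst h15; decide
  by_cases h16 : dia = "Sábado"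
  · subst h16; decide
  by_cases h17 : dia = "Domingo"
  · subst h17; decide
  -- residual: both sides are none
  have hA : dias_da_semana_italiano dia = none := by
    simp [dias_da_semana_italiano, pvAOuter, pvAInner, beq_iff_eq,
      h1, h2, h3, h4, h5, h6, h7, h8, h9, h10, h11, h12, h13, h14, h15, h16, h17]
  have hw : pvWeekend.get? dia = none := by
    simp [pvWeekend, PySem.Dict.get?, beq_iff_eq, Ne.symm h16, Ne.symm h17]
  have hB : dias_da_semana_italiano_alt dia = none := by
    unfold dias_da_semana_italiano_alt
    rw [hw]
    simp only
    split_ifs with he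
    · rcases Bool.or_eq_true_iff.mp he with e | e
      · have n1 := pv_notbase dia "Segunda" "-Feira" "Segunda-Feira" (by decide) (by decide) h2 e
        have n2 := pv_notbase dia "Terça" "-Feira" "Terça-Feira" (by decide) (by decide) h5 e
        have n3 := pv_notbase dia "Quarta" "-Feira" "Quarta-Feira" (by decide) (by decide) h8 e
        have n4 := pv_notbase dia "Quinta" "-Feira" "Quinta-Feira" (by decide) (by decide) h11 e
        have n5 := pv_notbase dia "Sexta" "-Feira" "Sexta-Feira" (by decide) (by decide) h14 e
        simp [pvOrdinals, PySem.Dict.get?, beq_iff_eq, Ne.symm n1, Ne.symm n2, Ne.symm n3, Ne.symm n4, Ne.symm n5]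
      · have n1 := pv_notbase dia "Segunda" " Feira" "Segunda Feira" (by decide) (by decide) h3 e
        have n2 := pv_notbase dia "Terça" " Feira" "Terça Feira" (by decide) (by decide) h6 e
        have n3 := pv_notbase dia "Quarta" " Feira" "Quarta Feira" (by decide) (by decide) h9 e
        have n4 := pv_notbase dia "Quinta" " Feira" "Quinta Feira" (by decide) (by decide) h12 e
        have n5 := pv_notbase dia "Sexta" " Feira" "Sexta Feira" (by decide) (by decide) h15 e
        simp [pvOrdinals, PySem.Dict.get?, beq_iff_eq, Ne.symm n1, Ne.symm n2, Ne.symm n3, Ne.symm n4, Ne.symm n5]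
    · simp [pvOrdinals, PySem.Dict.get?, beq_iff_eq, Ne.symm h1, Ne.symm h4, Ne.symm h7, Ne.symm h10, Ne.symm h13]
  rw [hA, hB]

-- ===== VERDICT (by name: the statement is the Claim_ definition above) =====
theorem dias_da_semana_italiano_spec : Claim_equal_dias_da_semana_italiano := by
  intro dia _
  unfold Spec_dias_da_semana_italiano
  exact pv_equal dia
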